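-- pv_equiv track=rewrite | github.com/pmacg/matts_resistors | resistors.py | is_numbery
-- ===== SOURCE A (Python) =====
-- def is_numbery(word):
--   found_digit = False
--   for c in word:
--     if c not in '0123456789.,':
--       return False
--     if c in '0123456789':
--       found_digit = True
--   return found_digit
-- ===== SOURCE B (Python) =====
-- def is_numbery(word):
--   return word.replace('.', '').replace(',', '').isdigit()
-- ===== Notes on version B (the rewrite author's own statement) =====
-- stated objective: simpler
-- what changed: Instead of A's character loop with a found_digit flag and early return, B deletes the separator characters with str.replace and asks str.isdigit of the residue (nonempty all-digits), so B contains no loop or flag at all.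
import Mathlib
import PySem

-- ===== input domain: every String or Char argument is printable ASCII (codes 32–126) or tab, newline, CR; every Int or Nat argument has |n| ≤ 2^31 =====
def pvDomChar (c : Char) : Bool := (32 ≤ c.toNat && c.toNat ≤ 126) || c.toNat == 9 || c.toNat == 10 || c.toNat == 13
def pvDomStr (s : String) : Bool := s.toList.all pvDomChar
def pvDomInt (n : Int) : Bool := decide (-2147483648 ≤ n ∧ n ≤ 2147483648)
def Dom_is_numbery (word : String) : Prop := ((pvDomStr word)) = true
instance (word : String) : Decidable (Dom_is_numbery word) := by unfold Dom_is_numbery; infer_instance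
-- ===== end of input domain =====

-- B: no loop or flag at all — delete the separators '.' and ',' with str.replace and test the residue with str.isdigit; same O(n) cost, simpler.
-- ===== PORT A =====
-- the literal '0123456789.,' and '0123456789' as character lists ('c in str' = membership)
def pvValidChars : List Char := ['0','1','2','3','4','5','6','7','8','9','.',',']
def pvDigitChars : List Char := ['0','1','2','3','4','5','6','7','8','9']

def is_numbery_loop (cs : List Char) (found_digit : Bool) : Bool :=
  match cs with
  | [] => found_digit
  | c :: rest =>
    if (pvValidChars.contains c) = false then false
    else if pvDigitChars.contains c then is_numbery_loop rest true
    else is_numbery_loop rest found_digit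

def is_numbery (word : String) : Bool := is_numbery_loop word.toList false

-- ===== PORT B =====
def is_numbery_alt (word : String) : Bool :=
  PySem.Str.strIsdigit (PySem.Str.replace (PySem.Str.replace word "." "") "," "")

-- ===== PRECONDITION & SPEC =====
def Spec_is_numbery (word : String) (out : Bool) : Prop := out = is_numbery_alt word
instance (word : String) (out : Bool) : Decidable (Spec_is_numbery word out) := by unfold Spec_is_numbery; infer_instance

-- ===== CLAIM (what is proved, stated in full; the proofs are below) =====
def Claim_equal_is_numbery : Prop := ∀ (word : String), Dom_is_numbery word → Spec_is_numbery word (is_numbery word)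

-- ===== LEMMAS AND PROOFS =====

-- str.replace with a one-char pattern and empty replacement is a filter
lemma replace_go_single (d : Char) (fuel : Nat) (l acc : List Char) (h : l.length ≤ fuel) :
    PySem.Chars.replace.go [d] [] fuel l acc = acc.reverse ++ l.filter (fun c => !(c == d)) := by
  induction fuel generalizing l acc with
  | zero =>
    have : l = [] := List.length_eq_zero_iff.mp (Nat.le_zero.mp h)
    subst this; simp [PySem.Chars.replace.go]
  | succ n ih =>
    cases l with
    | nil => simp [PySem.Chars.replace.go]
    | cons c t =>
      by_cases hc : c = d
      · subst hc
        have hp : [c].isPrefixOf (c :: t) = true := by simp [List.isPrefixOf]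
        simp only [PySem.Chars.replace.go, hp]
        rw [ih _ _ (by simpa using Nat.le_of_succ_le_succ h)]
        simp
      · have hp : [d].isPrefixOf (c :: t) = false := by
          simp [List.isPrefixOf]; exact fun h' => hc h'.symm
        simp [PySem.Chars.replace.go, hp, ih _ _ (by simpa using Nat.le_of_succ_le_succ h), hc]

lemma replace_single (d : Char) (s : List Char) :
    PySem.Chars.replace s [d] [] = s.filter (fun c => !(c == d)) := by
  simp [PySem.Chars.replace, replace_go_single d s.length s [] le_rfl]

lemma char_toNat_eq (c d : Char) (h : c.toNat = d.toNat) : c = d :=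
  Char.ext (UInt32.toNat_inj.mp h)

lemma mem_digits_iff (c : Char) : c ∈ pvDigitChars ↔ (48 ≤ c.toNat ∧ c.toNat ≤ 57) := by
  constructor
  · intro hm; fin_cases hm <;> exact ⟨by decide, by decide⟩
  · rintro ⟨h1, h2⟩
    have hd : c.toNat = 48 ∨ c.toNat = 49 ∨ c.toNat = 50 ∨ c.toNat = 51 ∨ c.toNat = 52 ∨
      c.toNat = 53 ∨ c.toNat = 54 ∨ c.toNat = 55 ∨ c.toNat = 56 ∨ c.toNat = 57 := by omega
    rcases hd with h|h|h|h|h|h|h|h|h|h <;> first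
      | (rw [char_toNat_eq c '0' h]; decide) | (rw [char_toNat_eq c '1' h]; decide)
      | (rw [char_toNat_eq c '2' h]; decide) | (rw [char_toNat_eq c '3' h]; decide)
      | (rw [char_toNat_eq c '4' h]; decide) | (rw [char_toNat_eq c '5' h]; decide)
      | (rw [char_toNat_eq c '6' h]; decide) | (rw [char_toNat_eq c '7' h]; decide)
      | (rw [char_toNat_eq c '8' h]; decide) | (rw [char_toNat_eq c '9' h]; decide)

-- the digit test of A equals Python's str.isdigit character test
lemma dig_eq (c : Char) : (pvDigitChars.contains c) = PySem.Chars.isdigit c := by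
  by_cases h : 48 ≤ c.toNat ∧ c.toNat ≤ 57
  · have h1 : '0' ≤ c := h.1
    have h2 : c ≤ '9' := h.2
    simp [PySem.Chars.isdigit, List.contains_eq_mem, (mem_digits_iff c).mpr h, h1, h2]
  · have h1 : c ∉ pvDigitChars := fun hm => h ((mem_digits_iff c).mp hm)
    have h2 : ¬ ('0' ≤ c ∧ c ≤ '9') := fun ⟨a, b⟩ => h ⟨a, b⟩
    simp only [List.contains_eq_mem, PySem.Chars.isdigit]
    rw [decide_eq_false (by simpa using h1)]
    rcases not_and_or.mp h2 with h' | h' <;> simp [h']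

lemma valid_eq_dig (c : Char) (hp : c ≠ '.') (hk : c ≠ ',') :
    (pvValidChars.contains c) = (pvDigitChars.contains c) := by
  simp only [List.contains_eq_mem]
  rw [decide_eq_decide]
  constructor
  · intro hm
    fin_cases hm <;> first | decide | exact absurd rfl hp | exact absurd rfl hk
  · intro hm; fin_cases hm <;> decide

-- characterisation of A's loop
lemma is_numbery_loop_eq (cs : List Char) (fd : Bool) :
    is_numbery_loop cs fd =
      (cs.all (fun c => pvValidChars.contains c) &&
       (fd || cs.any (fun c => pvDigitChars.contains c))) := by
  induction cs generalizing fd with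
  | nil => simp [is_numbery_loop]
  | cons c rest ih =>
    simp only [is_numbery_loop, List.all_cons, List.any_cons]
    cases hv : (pvValidChars.contains c) with
    | false => simp
    | true =>
      cases hd : (pvDigitChars.contains c) with
      | false => simp [ih]
      | true => simp [ih]

-- the residue after deleting '.' and ','
def pvResidue (cs : List Char) : List Char :=
  (cs.filter (fun c => !(c == '.'))).filter (fun c => !(c == ','))

lemma all_residue (cs : List Char) :
    (pvResidue cs).all PySem.Chars.isdigit = cs.all (fun c => pvValidChars.contains c) := by
  induction cs with
  | nil => rfl
  | cons c t ih =>
    by_cases hp : c = '.'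
    · subst hp; simpa [pvResidue] using ih
    · by_cases hk : c = ','
      · subst hk; simpa [pvResidue] using ih
      · have : pvResidue (c :: t) = c :: pvResidue t := by
          simp [pvResidue, hp, hk]
        rw [this, List.all_cons, List.all_cons, ih, ← dig_eq, valid_eq_dig c hp hk]

lemma isEmpty_residue (cs : List Char)
    (h : cs.all (fun c => pvValidChars.contains c) = true) :
    (pvResidue cs).isEmpty = !(cs.any (fun c => pvDigitChars.contains c)) := by
  induction cs with
  | nil => rfl
  | cons c t ih =>
    rw [List.all_cons] at h
    have ht := ih (Bool.and_elim_right h)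
    by_cases hp : c = '.'
    · subst hp
      have : pvResidue ('.' :: t) = pvResidue t := by simp [pvResidue]
      rw [this, ht, List.any_cons]
      rw [show (pvDigitChars.contains '.') = false from rfl, Bool.false_or]
    · by_cases hk : c = ','
      · subst hk
        have : pvResidue (',' :: t) = pvResidue t := by simp [pvResidue]
        rw [this, ht, List.any_cons]
        rw [show (pvDigitChars.contains ',') = false from rfl, Bool.false_or]
      · have hres : pvResidue (c :: t) = c :: pvResidue t := by
          simp [pvResidue, hp, hk]
        have hdig : (pvDigitChars.contains c) = true := by
          rw [← valid_eq_dig c hp hk]; exact Bool.and_elim_left h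
        rw [hres, List.any_cons, hdig]
        simp

-- ===== VERDICT (by name: the statement is the Claim_ definition above) =====
theorem is_numbery_spec : Claim_equal_is_numbery := by
  intro word _
  unfold Spec_is_numbery is_numbery is_numbery_alt
  rw [is_numbery_loop_eq]
  have h2 : (PySem.Str.replace (PySem.Str.replace word "." "") "," "").toList
      = pvResidue word.toList := by
    rw [PySem.Str.toList_replace, PySem.Str.toList_replace]
    show PySem.Chars.replace (PySem.Chars.replace word.toList ['.'] []) [','] [] = _
    rw [replace_single, replace_single]; rfl
  rw [PySem.Str.strIsdigit_eq, h2, PySem.Chars.strIsdigit, all_residue]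
  cases hall : word.toList.all (fun c => pvValidChars.contains c) with
  | false => simp
  | true =>
    rw [isEmpty_residue word.toList hall]
    simp
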